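-- pv_equiv track=rewrite | github.com/trinar/comor | comor.py | vratToken
-- ===== SOURCE A (Python) =====
-- hlasky = ['Vynimka v programe!\n',
--           'Zásobník dataStack je prázdny!\n',
--           'Zásobník helpStack je prázdny!\n',
--           'Zlý formát prvku v dataStack!\n',
--           'Nesprávny počet zátvoriek!\n',
--           'Súbor nenájdený!\n',
--           'Modul nenájdený1\n'] #chybove hlasky
--
-- def vratToken(retazec):
--   '''vrati jeden token z programu'''
--   token = ''
--   zatvoriek = 0
--   komentar = False
--
--   retazec = retazec.strip()
--
--   for znak in retazec: #pre kazdy znak v retazci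
--     if znak == '[' and not komentar: #je to otvaracia zatvorka mimo komentara?
--       zatvoriek += 1 #poznaci si otvaraciu zatvorku
--       if zatvoriek == 1 and len(token) > 0: #je to otvaracia zatvorka pre nasledujuci token?
--         yield token
--         token = ''
--       token += znak
--
--     elif znak == ']' and not komentar: #je to uzatvaracia zatvorka mimo komentara?
--       zatvoriek -= 1
--       token += znak
--       if zatvoriek == 0: #je to ukoncovacia zatvorka aktualneho tokenu?
--         yield token
--         token = ''
--       elif zatvoriek < 0:
--         raise SyntaxError(']: ' + hlasky[4]) #Vynimka poctu zatvoriek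
--
--     elif znak.isspace() and zatvoriek == 0 and not komentar: #je to prazdny znak mimo zatvoriek a komentara?
--       if token: #je uz nieco v tokene?
--         yield token
--         token = ''
--
--     elif ((znak == '#' and not komentar) or (znak == '\n' and komentar)) and zatvoriek == 0: # je to znak zacinajuci komentar alebo znak konca riadku v komentari mimo zatvoriek?
--       komentar = not komentar
--
--     else: #je to iny token ako zatvorky, prazdny znak alebo komentar?
--       if not komentar: #je to znak mimo komentara?
--         token += znak
--   else:
--     if token:
--       yield token
-- ===== SOURCE B (Python) =====
-- hlasky = ['Vynimka v programe!\n',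
--           'Zásobník dataStack je prázdny!\n',
--           'Zásobník helpStack je prázdny!\n',
--           'Zlý formát prvku v dataStack!\n',
--           'Nesprávny počet zátvoriek!\n',
--           'Súbor nenájdený!\n',
--           'Modul nenájdený1\n']
--
-- def vratToken(retazec):
--   '''vrati jeden token z programu: index-based scanner'''
--   s = retazec.strip()
--   n = len(s)
--   i = 0
--   word = []
--   while i < n:
--     c = s[i]
--     if c == '[':
--       if word:
--         yield ''.join(word)
--         word = []
--       depth = 0
--       j = i
--       while j < n:
--         if s[j] == '[':
--           depth += 1
--         elif s[j] == ']':
--           depth -= 1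
--           if depth == 0:
--             break
--         j += 1
--       if j < n:
--         yield s[i:j+1]
--         i = j + 1
--       else:
--         yield s[i:]  # unclosed bracket: partial token at end of input
--         i = n
--     elif c == ']':
--       raise SyntaxError(']: ' + hlasky[4])
--     elif c.isspace():
--       if word:
--         yield ''.join(word)
--         word = []
--       i += 1
--     elif c == '#':
--       # comment runs to the newline; it does not end the current word
--       j = s.find('\n', i)
--       i = n if j == -1 else j + 1
--     else:
--       word.append(c)
--       i += 1
--   if word:
--     yield ''.join(word)
-- ===== Notes on version B (the rewrite author's own statement) =====
-- stated objective: alternative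
-- what changed: Replaced A's single per-character state machine (token/bracket-counter/comment-flag updated on every char) with an index-based scanner that dispatches on the current char: a dedicated inner scan finds the matching ']' for a '[' chunk, a comment skip jumps straight past the next newline, and ordinary chars accumulate into the current word.
import Mathlib
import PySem

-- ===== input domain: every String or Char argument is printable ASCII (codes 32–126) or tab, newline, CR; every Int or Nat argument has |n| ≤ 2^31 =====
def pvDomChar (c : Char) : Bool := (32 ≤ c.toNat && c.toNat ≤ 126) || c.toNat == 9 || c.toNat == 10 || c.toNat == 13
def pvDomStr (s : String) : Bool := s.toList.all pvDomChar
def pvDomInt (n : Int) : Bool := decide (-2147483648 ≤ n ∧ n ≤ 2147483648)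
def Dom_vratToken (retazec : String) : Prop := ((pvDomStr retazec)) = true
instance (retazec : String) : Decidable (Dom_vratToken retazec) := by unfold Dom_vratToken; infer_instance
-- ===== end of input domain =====

-- B rewrites A's per-character state-machine generator as an explicit index-based scanner
-- (bracket scan / comment skip / word accumulation); objective: alternative decomposition.

-- ===== PORT A =====
-- literal port of A's per-char loop; state = (token, zatvoriek, komentar).
-- On the ']'-raise path (excluded by Pre_) the port returns no further tokens.
def vratTokenLoop : List Char → List Char → Int → Bool → List String
  | [], token, _, _ => if token ≠ [] then [String.ofList token] else []
  | znak :: rest, token, zatvoriek, komentar =>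
    if znak = '[' ∧ ¬komentar then
      let z := zatvoriek + 1
      if z = 1 ∧ token.length > 0 then
        String.ofList token :: vratTokenLoop rest ['['] z komentar
      else
        vratTokenLoop rest (token ++ ['[']) z komentar
    else if znak = ']' ∧ ¬komentar then
      let z := zatvoriek - 1
      let t := token ++ [']']
      if z = 0 then String.ofList t :: vratTokenLoop rest [] z komentar
      else if z < 0 then []   -- Python raises SyntaxError here (outside Pre_)
      else vratTokenLoop rest t z komentar
    else if PySem.Chars.isspace znak ∧ zatvoriek = 0 ∧ ¬komentar then
      if token ≠ [] then String.ofList token :: vratTokenLoop rest [] zatvoriek komentar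
      else vratTokenLoop rest token zatvoriek komentar
    else if ((znak = '#' ∧ ¬komentar) ∨ (znak = '\n' ∧ komentar)) ∧ zatvoriek = 0 then
      vratTokenLoop rest token zatvoriek (!komentar)
    else
      if ¬komentar then vratTokenLoop rest (token ++ [znak]) zatvoriek komentar
      else vratTokenLoop rest token zatvoriek komentar

def vratToken (retazec : String) : List String :=
  vratTokenLoop (PySem.Str.strip retazec).toList [] 0 false

-- ===== PORT B =====
-- B helpers: bScan = the inner bracket-matching scan (returns the balanced chunk and the rest,
-- none at EOF); skipComment = advance past the next newline.
def bScan : List Char → Int → Option (List Char × List Char)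
  | [], _ => none
  | c :: rest, depth =>
    if c = '[' then
      match bScan rest (depth + 1) with
      | some (t, r) => some (c :: t, r)
      | none => none
    else if c = ']' then
      if depth - 1 = 0 then some ([c], rest)
      else
        match bScan rest (depth - 1) with
        | some (t, r) => some (c :: t, r)
        | none => none
    else
      match bScan rest depth with
      | some (t, r) => some (c :: t, r)
      | none => none

theorem bScan_shrinks : ∀ (cs : List Char) (d : Int) (t r : List Char),
    bScan cs d = some (t, r) → r.length < cs.length := by
  intro cs
  induction cs with
  | nil => intro d t r h; simp [bScan] at h
  | cons c rest ih =>
    intro d t r h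
    simp only [bScan] at h
    split_ifs at h with h1 h2 h3
    · cases hb : bScan rest (d + 1) with
      | none => rw [hb] at h; simp at h
      | some p => rw [hb] at h; simp at h
                  have := ih (d + 1) p.1 p.2 (by rw [hb])
                  simp [← h.2]; omega
    · simp at h
      have : r = rest := h.2.symm ▸ rfl
      simp [this]
    · cases hb : bScan rest (d - 1) with
      | none => rw [hb] at h; simp at h
      | some p => rw [hb] at h; simp at h
                  have := ih (d - 1) p.1 p.2 (by rw [hb])
                  simp [← h.2]; omega
    · cases hb : bScan rest d with
      | none => rw [hb] at h; simp at h
      | some p => rw [hb] at h; simp at h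
                  have := ih d p.1 p.2 (by rw [hb])
                  simp [← h.2]; omega

def skipComment : List Char → List Char
  | [] => []
  | c :: rest => if c = '\n' then rest else skipComment rest

theorem skipComment_le : ∀ (cs : List Char), (skipComment cs).length ≤ cs.length := by
  intro cs
  induction cs with
  | nil => simp [skipComment]
  | cons c rest ih =>
    simp only [skipComment]
    split_ifs <;> simp <;> omega

def altLoop : List Char → List Char → List String
  | [], word => if word ≠ [] then [String.ofList word] else []
  | c :: rest, word =>
    if c = '[' then
      let pre := if word ≠ [] then [String.ofList word] else []
      match hb : bScan (c :: rest) 0 with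
      | some (t, r) => pre ++ String.ofList t :: altLoop r []
      | none => pre ++ [String.ofList (c :: rest)]
    else if c = ']' then []   -- Python raises SyntaxError here (outside Pre_)
    else if PySem.Chars.isspace c then
      (if word ≠ [] then [String.ofList word] else []) ++ altLoop rest []
    else if c = '#' then altLoop (skipComment rest) word
    else altLoop rest (word ++ [c])
  termination_by cs _ => cs.length
  decreasing_by
  · exact bScan_shrinks _ _ _ _ hb
  · simp
  · have := skipComment_le rest; simp; omega
  · simp

def vratToken_alt (retazec : String) : List String :=
  altLoop (PySem.Str.strip retazec).toList []

-- ===== PRECONDITION & SPEC =====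
-- Pre_ excludes exactly the inputs on which Python A raises SyntaxError (an over-closing ']'
-- outside comments): balancedScan checks that the bracket depth, counted outside '#'…'\n'
-- comments, never goes negative.
def balancedScan : List Char → Int → Bool → Bool
  | [], _, _ => true
  | c :: rest, d, com =>
    if com then balancedScan rest d (c ≠ '\n')
    else if c = '[' then balancedScan rest (d + 1) false
    else if c = ']' then decide (0 < d) && balancedScan rest (d - 1) false
    else if c = '#' ∧ d = 0 then balancedScan rest d true
    else balancedScan rest d false

def Pre_vratToken (retazec : String) : Prop :=
  balancedScan (PySem.Str.strip retazec).toList 0 false = true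
instance (retazec : String) : Decidable (Pre_vratToken retazec) := by unfold Pre_vratToken; infer_instance

def pvWitness_vratToken : String := " ab[c d]#x\ne "

def Spec_vratToken (retazec : String) (out : List String) : Prop := out = vratToken_alt retazec
instance (retazec : String) (out : List String) : Decidable (Spec_vratToken retazec out) := by unfold Spec_vratToken; infer_instance

-- ===== CLAIM (what is proved, stated in full; the proofs are below) =====
def Claim_equal_vratToken : Prop := ∀ (retazec : String), Dom_vratToken retazec → Pre_vratToken retazec → Spec_vratToken retazec (vratToken retazec)

-- ===== LEMMAS AND PROOFS =====

-- A inside a comment (depth 0) just skips to past the newline.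
theorem loop_comment : ∀ (cs token : List Char),
    vratTokenLoop cs token 0 true = vratTokenLoop (skipComment cs) token 0 false := by
  intro cs
  induction cs with
  | nil => intro token; simp [skipComment, vratTokenLoop]
  | cons c rest ih =>
    intro token
    by_cases hn : c = '\n'
    · simp [vratTokenLoop, skipComment, hn]
    · simp [vratTokenLoop, skipComment, hn, ih]

-- A inside brackets (depth ≥ 1) consumes exactly what bScan matches.
theorem loop_bracket : ∀ (cs token : List Char) (d : Int), 1 ≤ d → token ≠ [] →
    vratTokenLoop cs token d false =
      (match bScan cs d with
       | some (t, r) => String.ofList (token ++ t) :: vratTokenLoop r [] 0 false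
       | none => [String.ofList (token ++ cs)]) := by
  intro cs
  induction cs with
  | nil => intro token d _ ht; simp [vratTokenLoop, bScan, ht]
  | cons c rest ih =>
    intro token d hd ht
    by_cases h1 : c = '['
    · have hne : d + 1 ≠ 1 := by omega
      have ihx := ih (token ++ ['[']) (d + 1) (by omega) (by simp)
      cases hb : bScan rest (d + 1) with
      | none => simp [hb] at ihx; simp [vratTokenLoop, bScan, h1, hne, hb, ihx]
      | some p => cases p; simp [hb] at ihx; simp [vratTokenLoop, bScan, h1, hne, hb, ihx]
    · by_cases h2 : c = ']'
      · by_cases h3 : d - 1 = 0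
        · simp [vratTokenLoop, bScan, h1, h2, h3]
        · have h4 : ¬ (d - 1 < 0) := by omega
          have ihx := ih (token ++ [']']) (d - 1) (by omega) (by simp)
          cases hb : bScan rest (d - 1) with
          | none => simp [hb] at ihx; simp [vratTokenLoop, bScan, h1, h2, h3, h4, hb, ihx]
          | some p => cases p; simp [hb] at ihx; simp [vratTokenLoop, bScan, h1, h2, h3, h4, hb, ihx]
      · have hd0 : d ≠ 0 := by omega
        have ihx := ih (token ++ [c]) d hd (by simp)
        cases hb : bScan rest d with
        | none => simp [hb] at ihx; simp [vratTokenLoop, bScan, h1, h2, hd0, hb, ihx]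
        | some p => cases p; simp [hb] at ihx; simp [vratTokenLoop, bScan, h1, h2, hd0, hb, ihx]
-- balancedScan survives a successful bracket scan.
theorem balanced_after_bScan : ∀ (cs : List Char) (d : Int) (t r : List Char), 1 ≤ d →
    balancedScan cs d false = true → bScan cs d = some (t, r) →
    balancedScan r 0 false = true := by
  intro cs
  induction cs with
  | nil => intro d t r _ _ hb; simp [bScan] at hb
  | cons c rest ih =>
    intro d t r hd hbal hb
    by_cases h1 : c = '['
    · simp only [bScan, h1, if_pos rfl] at hb
      simp [balancedScan, h1] at hbal
      cases hb2 : bScan rest (d + 1) with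
      | none => rw [hb2] at hb; simp at hb
      | some p =>
          obtain ⟨t1, r1⟩ := p
          rw [hb2] at hb; simp at hb
          obtain ⟨hbt, hbr⟩ := hb
          subst hbr
          exact ih (d + 1) t1 _ (by omega) hbal hb2
    · by_cases h2 : c = ']'
      · simp [bScan, h1, h2] at hb
        simp [balancedScan, h1, h2] at hbal
        by_cases h3 : d - 1 = 0
        · rw [if_pos h3] at hb
          simp at hb
          rw [← hb.2, ← h3]
          exact hbal.2
        · rw [if_neg h3] at hb
          cases hb2 : bScan rest (d - 1) with
          | none => rw [hb2] at hb; simp at hb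
          | some p =>
              obtain ⟨t1, r1⟩ := p
              rw [hb2] at hb; simp at hb
              obtain ⟨hbt, hbr⟩ := hb
              subst hbr
              exact ih (d - 1) t1 _ (by omega) hbal.2 hb2
      · have hd0 : d ≠ 0 := by omega
        simp only [bScan, if_neg h1, if_neg h2] at hb
        simp [balancedScan, h1, h2, hd0] at hbal
        cases hb2 : bScan rest d with
        | none => rw [hb2] at hb; simp at hb
        | some p =>
            obtain ⟨t1, r1⟩ := p
            rw [hb2] at hb; simp at hb
            obtain ⟨hbt, hbr⟩ := hb
            subst hbr
            exact ih d t1 _ hd hbal hb2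

theorem balanced_comment : ∀ (cs : List Char),
    balancedScan cs 0 true = balancedScan (skipComment cs) 0 false := by
  intro cs
  induction cs with
  | nil => simp [skipComment, balancedScan]
  | cons c rest ih =>
    by_cases hn : c = '\n'
    · simp [balancedScan, skipComment, hn]
    · simp [balancedScan, skipComment, hn, ih]

theorem altLoop_bracket (c : Char) (rest word : List Char) (h1 : c = '[') :
    altLoop (c :: rest) word =
      (if word ≠ [] then [String.ofList word] else []) ++
        (match bScan (c :: rest) 0 with
         | some (t, r) => String.ofList t :: altLoop r []
         | none => [String.ofList (c :: rest)]) := by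
  rw [altLoop, if_pos h1]
  split
  · split
    next t r heq => rw [heq]
    next heq => rw [heq]
  · split
    next t r heq => rw [heq]
    next heq => rw [heq]

theorem main_loop : ∀ (n : Nat) (cs token : List Char), cs.length ≤ n →
    balancedScan cs 0 false = true →
    vratTokenLoop cs token 0 false = altLoop cs token := by
  intro n
  induction n with
  | zero =>
    intro cs token hlen _
    have : cs = [] := by
      cases cs with
      | nil => rfl
      | cons a b => simp at hlen
    subst this
    simp [vratTokenLoop, altLoop]
  | succ n ih =>
    intro cs token hlen hbal
    cases cs with
    | nil => simp [vratTokenLoop, altLoop]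
    | cons c rest =>
      simp only [List.length_cons, Nat.succ_le_succ_iff] at hlen
      by_cases h1 : c = '['
      · -- A: depth becomes 1, token yielded if nonempty; B: bracket scan
        have hbr := loop_bracket rest ['['] 1 (by omega) (by simp)
        have hbal1 : balancedScan rest 1 false = true := by
          simpa [balancedScan, h1] using hbal
        rw [altLoop_bracket c rest token h1]
        cases hb : bScan rest 1 with
        | none =>
          simp only [hb] at hbr
          by_cases htok : token = []
          · subst htok
            simp [vratTokenLoop, bScan, h1, hb, hbr]
          · simp [vratTokenLoop, bScan, h1, hb, hbr, htok]
        | some p =>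
          obtain ⟨t, r⟩ := p
          simp only [hb] at hbr
          have hrlen : r.length < rest.length := bScan_shrinks rest 1 t r hb
          have hrec : vratTokenLoop r [] 0 false = altLoop r [] :=
            ih r [] (by omega) (balanced_after_bScan rest 1 t r (by omega) hbal1 hb)
          rw [hrec] at hbr
          by_cases htok : token = []
          · subst htok
            simp [vratTokenLoop, bScan, h1, hb, hbr]
          · simp [vratTokenLoop, bScan, h1, hb, hbr, htok]
      · by_cases h2 : c = ']'
        · exfalso
          simp [balancedScan, h1, h2] at hbal
        · by_cases h3 : PySem.Chars.isspace c = true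
          · have hbal2 : balancedScan rest 0 false = true := by
              have hh : c ≠ '#' := by
                intro hc; rw [hc] at h3; simp [PySem.Chars.isspace] at h3
              simpa [balancedScan, h1, h2, hh] using hbal
            have hrec := ih rest [] (by omega) hbal2
            by_cases htok : token = []
            · subst htok
              simp [vratTokenLoop, altLoop, h1, h2, h3, hrec]
            · simp [vratTokenLoop, altLoop, h1, h2, h3, hrec, htok]
          · by_cases h4 : c = '#'
            · -- comment: A toggles komentar, B skips past the newline
              have hbal3 : balancedScan (skipComment rest) 0 false = true := by
                rw [← balanced_comment]
                simpa [balancedScan, h1, h2, h4] using hbal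
              have hrec := ih (skipComment rest) token
                (by have := skipComment_le rest; omega) hbal3
              have h5 : PySem.Chars.isspace '#' = false := by decide
              simp [vratTokenLoop, altLoop, h1, h2, h3, h4, h5, loop_comment, hrec]
            · -- ordinary character: appended to the word
              have hbal4 : balancedScan rest 0 false = true := by
                simpa [balancedScan, h1, h2, h4] using hbal
              have hrec := ih rest (token ++ [c]) (by omega) hbal4
              simp [vratTokenLoop, altLoop, h1, h2, h3, h4, hrec]

-- ===== VERDICT (by name: the statement is the Claim_ definition above) =====
theorem vratToken_spec : Claim_equal_vratToken := by
  intro retazec _ hpre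
  unfold Spec_vratToken vratToken vratToken_alt
  exact main_loop _ _ _ le_rfl hpre
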